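-- pv_equiv track=rewrite | github.com/igorpie1705/wdi-zadania | zestaw5/zad16.py | wyraz
-- ===== SOURCE A (Python) =====
-- def czy_samogloska(ch):
--     samogloski = ['a', 'e', 'i', 'o', 'u', 'y']
--     return 1 if ch in samogloski else 0
--
-- def wyraz(s1, s2):
--     samogloski_s1 = 0
--     suma_ascii_s1 = 0
--     n = len(s2)
--
--     for i in range(len(s1)):
--         samogloski_s1 += czy_samogloska(s1[i])
--         suma_ascii_s1 += ord(s1[i])
--     def rek(i, suma_ascii, cnt):
--         if i == n:
--             return suma_ascii_s1 == suma_ascii and cnt == samogloski_s1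
--
--         return rek(i+1, suma_ascii, cnt) or rek(i+1, suma_ascii + ord(s2[i]), cnt + czy_samogloska(s2[i]))
--
--     return rek(0, 0, 0)
-- ===== SOURCE B (Python) =====
-- def wyraz(s1, s2):
--     vowels = set('aeiouy')
--     target = (sum(map(ord, s1)), sum(c in vowels for c in s1))
--     reach = {(0, 0)}
--     for c in s2:
--         reach |= {(s + ord(c), v + (c in vowels)) for s, v in reach}
--     return target in reach
-- ===== Notes on version B (the rewrite author's own statement) =====
-- stated objective: faster
-- what changed: Replaced the O(2^n) include/exclude recursion over subsets of s2 with a subset-sum style DP that maintains the set of reachable (ascii_sum, vowel_count) pairs in one pass over s2.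
import Mathlib
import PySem

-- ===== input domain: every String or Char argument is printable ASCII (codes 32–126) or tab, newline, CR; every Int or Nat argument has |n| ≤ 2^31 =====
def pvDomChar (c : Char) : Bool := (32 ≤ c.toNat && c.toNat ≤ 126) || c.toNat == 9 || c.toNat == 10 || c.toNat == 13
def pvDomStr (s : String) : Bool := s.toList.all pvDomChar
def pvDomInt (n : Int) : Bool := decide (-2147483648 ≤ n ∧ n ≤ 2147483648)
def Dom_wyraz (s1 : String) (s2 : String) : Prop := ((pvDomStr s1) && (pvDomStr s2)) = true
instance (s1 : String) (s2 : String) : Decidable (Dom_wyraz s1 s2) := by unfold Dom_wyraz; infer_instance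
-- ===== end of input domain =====

-- B replaces A's O(2^n) include/exclude recursion by a one-pass DP over the set of reachable (ascii_sum, vowel_count) pairs (objective: faster, asymptotic).

-- ===== PORT A =====
-- czy_samogloska(ch)
def czy_samogloska (ch : Char) : Int :=
  if ch ∈ ['a', 'e', 'i', 'o', 'u', 'y'] then 1 else 0

-- rek(i, suma_ascii, cnt): structural recursion on the suffix of s2 from index i
def wyrazRek (sumaS1 : Int) (samS1 : Int) : List Char → Int → Int → Bool
  | [], suma, cnt => decide (sumaS1 = suma) && decide (cnt = samS1)
  | ch :: rest, suma, cnt =>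
      wyrazRek sumaS1 samS1 rest suma cnt ||
      wyrazRek sumaS1 samS1 rest (suma + (ch.toNat : Int)) (cnt + czy_samogloska ch)

def wyraz (s1 : String) (s2 : String) : Bool :=
  -- the for-loop accumulating (samogloski_s1, suma_ascii_s1) over s1
  let acc := s1.toList.foldl
    (fun (p : Int × Int) ch => (p.1 + czy_samogloska ch, p.2 + (ch.toNat : Int))) (0, 0)
  wyrazRek acc.2 acc.1 s2.toList 0 0

-- ===== PORT B =====
def wyrazVowels : PySem.Set Char := PySem.Set.ofList "aeiouy".toList

def wyrazStep (reach : PySem.Set (Int × Int)) (c : Char) : PySem.Set (Int × Int) :=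
  PySem.Set.union reach
    (PySem.Set.ofList (reach.map (fun p =>
      (p.1 + (c.toNat : Int), p.2 + (if wyrazVowels.contains c then 1 else 0)))))

def wyraz_alt (s1 : String) (s2 : String) : Bool :=
  let target : Int × Int :=
    ((s1.toList.map (fun c => (c.toNat : Int))).sum,
     (s1.toList.map (fun c => if wyrazVowels.contains c then (1 : Int) else 0)).sum)
  let reach := s2.toList.foldl wyrazStep (PySem.Set.ofList [((0 : Int), (0 : Int))])
  decide (target ∈ reach)

-- ===== PRECONDITION & SPEC =====
def Spec_wyraz (s1 : String) (s2 : String) (out : Bool) : Prop := out = wyraz_alt s1 s2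
instance (s1 : String) (s2 : String) (out : Bool) : Decidable (Spec_wyraz s1 s2 out) := by unfold Spec_wyraz; infer_instance

-- ===== CLAIM (what is proved, stated in full; the proofs are below) =====
def Claim_equal_wyraz : Prop := ∀ (s1 : String) (s2 : String), Dom_wyraz s1 s2 → Spec_wyraz s1 s2 (wyraz s1 s2)

-- ===== LEMMAS AND PROOFS =====

-- B's vowel test agrees with A's czy_samogloska
theorem czy_eq_vowels (ch : Char) :
    czy_samogloska ch = (if wyrazVowels.contains ch then (1 : Int) else 0) := by
  have hs : "aeiouy".toList = ['a', 'e', 'i', 'o', 'u', 'y'] := rfl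
  simp only [czy_samogloska, wyrazVowels, PySem.Set.contains, hs]
  by_cases h : ch ∈ ['a', 'e', 'i', 'o', 'u', 'y'] <;>
    simp_all [PySem.Set.mem_ofList]

-- A's single accumulating pass over s1 equals B's two map-sums
theorem foldl_acc_eq (l : List Char) (v s : Int) :
    l.foldl (fun (p : Int × Int) ch => (p.1 + czy_samogloska ch, p.2 + (ch.toNat : Int))) (v, s)
      = (v + (l.map czy_samogloska).sum, s + (l.map (fun c => (c.toNat : Int))).sum) := by
  induction l generalizing v s with
  | nil => simp
  | cons ch rest ih => simp [ih]; constructor <;> ring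

-- DP invariant: the target is reachable from working set S iff A's recursion succeeds from some pair in S
theorem reach_iff (t : Int × Int) (l : List Char) (S : PySem.Set (Int × Int)) :
    (t ∈ l.foldl wyrazStep S) ↔ ∃ p ∈ S, wyrazRek t.1 t.2 l p.1 p.2 = true := by
  induction l generalizing S with
  | nil =>
    simp only [List.foldl_nil, wyrazRek]
    constructor
    · intro h; exact ⟨t, h, by simp⟩
    · rintro ⟨p, hp, h⟩
      simp only [Bool.and_eq_true, decide_eq_true_eq] at h
      obtain ⟨h1, h2⟩ := h
      have : p = t := Prod.ext h1.symm h2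
      exact this ▸ hp
  | cons ch rest ih =>
    simp only [List.foldl_cons, ih, wyrazStep]
    constructor
    · rintro ⟨p, hp, h⟩
      rw [PySem.Set.mem_union] at hp
      rcases hp with hp | hp
      · exact ⟨p, hp, by simp [wyrazRek, h]⟩
      · rw [PySem.Set.mem_ofList, List.mem_map] at hp
        obtain ⟨q, hq, rfl⟩ := hp
        refine ⟨q, hq, ?_⟩
        simp only [wyrazRek, Bool.or_eq_true]
        right; rw [czy_eq_vowels]; exact h
    · rintro ⟨p, hp, h⟩
      simp only [wyrazRek, Bool.or_eq_true] at h
      rcases h with h | h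
      · exact ⟨p, by rw [PySem.Set.mem_union]; exact Or.inl hp, h⟩
      · refine ⟨(p.1 + (ch.toNat : Int), p.2 + (if wyrazVowels.contains ch then 1 else 0)), ?_, ?_⟩
        · rw [PySem.Set.mem_union]
          exact Or.inr (by rw [PySem.Set.mem_ofList, List.mem_map]; exact ⟨p, hp, rfl⟩)
        · rw [← czy_eq_vowels]; exact h

-- ===== VERDICT (by name: the statement is the Claim_ definition above) =====
theorem wyraz_spec : Claim_equal_wyraz := by
  intro s1 s2 _
  unfold Spec_wyraz wyraz wyraz_alt
  rw [foldl_acc_eq]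
  simp only [zero_add, ← czy_eq_vowels]
  rw [Bool.eq_iff_iff, decide_eq_true_iff, reach_iff]
  constructor
  · intro h
    exact ⟨((0 : Int), (0 : Int)), by simp [PySem.Set.mem_ofList], h⟩
  · rintro ⟨p, hp, h⟩
    rw [PySem.Set.mem_ofList] at hp
    simp only [List.mem_singleton] at hp
    subst hp
    exact h
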